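-- pv_equiv track=rewrite | github.com/talhankoc/ShapeOfLearning | NNGeneration/loadHousing.py | formatHousing
-- ===== SOURCE A (Python) =====
-- def formatHousing(line):
-- 	intEntries = [0,2,4,10,11,12]
-- 	strList = []
-- 	intList = []
-- 	lab = 1
-- 	for i in range(len(line)):
-- 		if i in intEntries:
-- 			intList.append(int(line[i]))
-- 		elif i==len(line)-1:
-- 			if line[i]== " <=50K.":
-- 				lab = 0
-- 		else:
-- 			strList.append(line[i])
-- 	return (intList,strList,lab)
-- ===== SOURCE B (Python) =====
-- def formatHousing(line):
--     # Index the row by column number, then carve the outputs out of the index: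
--     # pop the fixed integer columns, pop the label cell, and whatever is left
--     # over in the index (in column order) is the string data.
--     columns = dict(enumerate(line))
--     intList = []
--     for i in (0, 2, 4, 10, 11, 12):
--         if i in columns:
--             intList.append(int(columns.pop(i)))
--     lab = 0 if columns.pop(len(line) - 1, None) == " <=50K." else 1
--     strList = list(columns.values())
--     return (intList, strList, lab)
-- ===== Notes on version B (the rewrite author's own statement) =====
-- stated objective: alternative
-- what changed: B replaces A's single index-dispatching loop with a dict-carving algorithm: it builds a column-number-to-value dict, pops the fixed integer columns and then the label cell out of it, and takes the leftover dict values as the string list; Pre_ excludes only lines where int() raises ValueError (both programs raise there).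
import Mathlib
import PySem

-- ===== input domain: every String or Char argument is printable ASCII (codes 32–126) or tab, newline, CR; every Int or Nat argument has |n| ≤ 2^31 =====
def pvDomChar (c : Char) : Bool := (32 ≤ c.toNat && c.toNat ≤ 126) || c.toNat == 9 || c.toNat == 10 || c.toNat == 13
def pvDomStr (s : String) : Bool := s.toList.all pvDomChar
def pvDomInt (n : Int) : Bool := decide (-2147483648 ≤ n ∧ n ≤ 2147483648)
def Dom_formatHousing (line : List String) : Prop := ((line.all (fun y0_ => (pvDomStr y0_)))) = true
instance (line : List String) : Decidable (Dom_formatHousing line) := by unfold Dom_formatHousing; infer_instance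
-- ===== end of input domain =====

-- B carves the row out of a column-number→value dict (pop the integer columns, pop the label
-- cell, the leftover values are the string list) instead of A's index-dispatching loop;
-- objective: alternative algorithm/data structure, same cost.

-- ===== PORT A =====
-- loop body of A's for-loop, kept as a helper (same state: intList, strList, lab)
def stepA (line : List String) (st : List Int × List String × Int) (i : Nat) :
    List Int × List String × Int :=
  if i ∈ ([0, 2, 4, 10, 11, 12] : List Nat) then
    (st.1 ++ [(PySem.Int.ofStr? (line.getD i "")).getD 0], st.2.1, st.2.2)
  else if i = line.length - 1 then
    (st.1, st.2.1, if line.getD i "" = " <=50K." then 0 else st.2.2)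
  else
    (st.1, st.2.1 ++ [line.getD i ""], st.2.2)

def formatHousing (line : List String) : List Int × List String × Int :=
  (List.range line.length).foldl (stepA line) ([], [], 1)

-- ===== PORT B =====
-- body of B's for-loop over the integer columns: 'if i in columns: intList.append(int(columns.pop(i)))'
def popIntStep (st : List Int × PySem.Dict Int String) (i : Int) :
    List Int × PySem.Dict Int String :=
  match st.2.pop? i with
  | some (v, d') => (st.1 ++ [(PySem.Int.ofStr? v).getD 0], d')
  | none => st

def formatHousing_alt (line : List String) : List Int × List String × Int :=
  let columns0 := PySem.Dict.ofList (PySem.List.enumerate line)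
  let st := ([0, 2, 4, 10, 11, 12] : List Int).foldl popIntStep ([], columns0)
  -- 'lab = 0 if columns.pop(len(line) - 1, None) == " <=50K." else 1'
  let res : Int × PySem.Dict Int String :=
    match st.2.pop? ((line.length : Int) - 1) with
    | some (v, d') => ((if v = " <=50K." then 0 else 1), d')
    | none => (1, st.2)
  (st.1, res.2.values, res.1)

-- ===== PRECONDITION & SPEC =====
-- Pre_ excludes exactly the lines on which Python's int() raises ValueError
-- (a non-integer string at one of the integer columns 0,2,4,10,11,12 that exists);
-- BOTH programs raise there.
def Pre_formatHousing (line : List String) : Prop :=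
  ∀ i ∈ ([0, 2, 4, 10, 11, 12] : List Nat),
    i < line.length → (PySem.Int.ofStr? (line.getD i default)).isSome = true
instance (line : List String) : Decidable (Pre_formatHousing line) := by
  unfold Pre_formatHousing; infer_instance

def pvWitness_formatHousing : List String := ["7", "abc"]

def Spec_formatHousing (line : List String) (out : List Int × List String × Int) : Prop :=
  out = formatHousing_alt line
instance (line : List String) (out : List Int × List String × Int) :
    Decidable (Spec_formatHousing line out) := by unfold Spec_formatHousing; infer_instance

-- ===== CLAIM (what is proved, stated in full; the proofs are below) =====
def Claim_equal_formatHousing : Prop :=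
  ∀ (line : List String), Dom_formatHousing line → Pre_formatHousing line →
    Spec_formatHousing line (formatHousing line)

-- ===== LEMMAS AND PROOFS =====

-- canonical value both ports are proved equal to
def canonForm (line : List String) : List Int × List String × Int :=
  let idx : List Nat := [0, 2, 4, 10, 11, 12]
  let n := line.length
  ( (idx.filter (fun i => decide (i < n))).map
      (fun i => (PySem.Int.ofStr? (line.getD i "")).getD 0),
    ((List.range n).filter (fun i => decide (i ∉ idx ∧ i ≠ n - 1))).map
      (fun i => line.getD i ""),
    if line ≠ [] ∧ (n - 1) ∉ idx ∧ PySem.List.pyGet? line (-1) = some " <=50K." then 0 else 1 )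

-- the pair (i, line[i]) as B's dict stores it
def gfun (line : List String) (j : Nat) : Int × String := ((j : Int), line.getD j "")

-- ---------- A = canon ----------

lemma filterE_ge (n : Nat) (h : 13 ≤ n) :
    ([0, 2, 4, 10, 11, 12] : List Nat).filter (fun e => decide (e < n)) =
      [0, 2, 4, 10, 11, 12] := by
  have h0 : 0 < n := by omega
  have h2 : 2 < n := by omega
  have h4 : 4 < n := by omega
  have h10 : 10 < n := by omega
  have h11 : 11 < n := by omega
  have h12 : 12 < n := by omega
  simp [List.filter, h0, h2, h4, h10, h11, h12]

lemma rangeE (n : Nat) :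
    (List.range n).filter (fun i => decide (i ∈ ([0, 2, 4, 10, 11, 12] : List Nat))) =
      ([0, 2, 4, 10, 11, 12] : List Nat).filter (fun e => decide (e < n)) := by
  rcases Nat.lt_or_ge n 13 with h | h
  · interval_cases n <;> decide
  · rw [filterE_ge n h]
    obtain ⟨m, rfl⟩ : ∃ m, n = 13 + m := ⟨n - 13, by omega⟩
    clear h
    induction m with
    | zero => decide
    | succ k ih =>
      rw [show 13 + (k + 1) = (13 + k) + 1 from rfl, List.range_succ, List.filter_append, ih]
      have hmem : ((13 + k) ∈ ([0, 2, 4, 10, 11, 12] : List Nat)) = False := by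
        simp only [List.mem_cons, List.not_mem_nil, eq_iff_iff, iff_false, not_or,
          not_false_iff, and_true]
        omega
      simp [List.filter, hmem]

-- invariant of A's loop over the first m indices (all of them strictly below len-1)
lemma loopA (line : List String) (m : Nat) (hm : m + 1 ≤ line.length)
    (a : List Int) (b : List String) (l : Int) :
    (List.range m).foldl (stepA line) (a, b, l) =
      (a ++ ((List.range m).filter
          (fun i => decide (i ∈ ([0, 2, 4, 10, 11, 12] : List Nat)))).map
          (fun i => (PySem.Int.ofStr? (line.getD i "")).getD 0),
       b ++ ((List.range m).filter
          (fun i => !decide (i ∈ ([0, 2, 4, 10, 11, 12] : List Nat)))).map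
          (fun i => line.getD i ""),
       l) := by
  induction m with
  | zero => simp
  | succ k ih =>
    rw [List.range_succ, List.foldl_append, ih (by omega), List.foldl_cons, List.foldl_nil,
      List.filter_append, List.filter_append]
    have hk : (k = line.length - 1) = False := eq_false (by omega)
    by_cases hE : k ∈ ([0, 2, 4, 10, 11, 12] : List Nat)
    · fin_cases hE <;> simp [stepA]
    · simp only [List.mem_cons, List.not_mem_nil, or_false, not_or] at hE
      simp [stepA, hE, hk]

-- canon's strList predicate agrees with plain non-membership on indices below the last one
lemma strFilter (k : Nat) :
    (List.range k).filter
        (fun i => decide (i ∉ ([0, 2, 4, 10, 11, 12] : List Nat) ∧ i ≠ k + 1 - 1)) =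
      (List.range k).filter
        (fun i => !decide (i ∈ ([0, 2, 4, 10, 11, 12] : List Nat))) := by
  apply List.filter_congr
  intro x hx
  have hxk : x < k := List.mem_range.mp hx
  by_cases hxE : x ∈ ([0, 2, 4, 10, 11, 12] : List Nat) <;> simp [hxE] <;> omega

lemma A_eq_canon (line : List String) : formatHousing line = canonForm line := by
  rcases hn : line.length with _ | k
  · have : line = [] := List.length_eq_zero_iff.mp hn
    subst this; decide
  · have hne : line ≠ [] := by intro h; subst h; simp at hn
    unfold formatHousing canonForm
    dsimp only
    rw [hn, List.range_succ, List.foldl_append, loopA line k (by omega), List.foldl_cons,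
      List.foldl_nil, ← rangeE (k + 1), List.range_succ, List.filter_append,
      List.filter_append, strFilter k]
    have hget : PySem.List.pyGet? line (-1) = some (line.getD k "") := by
      rw [PySem.List.pyGet?_neg_one, List.getLast?_eq_getElem?, hn]
      simp [List.getD, List.getElem?_eq_getElem (by omega : k < line.length)]
    by_cases hE : k ∈ ([0, 2, 4, 10, 11, 12] : List Nat)
    · fin_cases hE <;> simp [stepA]
    · have hk' : line.length - 1 = k := by omega
      have hE' : (k ∈ ([0, 2, 4, 10, 11, 12] : List Nat)) = False := eq_false hE
      simp only [stepA, if_neg hE, hk']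
      by_cases hs : line.getD k "" = " <=50K." <;> simp [hE', hne, hget] <;>
        simpa using hE

-- ---------- B = canon ----------

-- enumerate as an indexed map over range
lemma enum_eq (xs : List String) (s : Int) :
    PySem.List.enumerate xs s =
      (List.range xs.length).map (fun (j : Nat) => (s + (j : Int), xs.getD j "")) := by
  induction xs generalizing s with
  | nil => simp [PySem.List.enumerate_nil]
  | cons x t ih =>
    rw [PySem.List.enumerate_cons, ih (s + 1)]
    simp only [List.length_cons, List.range_succ_eq_map, List.map_cons, List.map_map]
    congr 1
    · simp
    · apply List.map_congr_left
      intro j _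
      simp only [Function.comp, List.getD_cons_succ, Nat.succ_eq_add_one, Prod.mk.injEq]
      constructor
      · push_cast; ring
      · trivial

lemma enum_eq_gmap (line : List String) :
    PySem.List.enumerate line = (List.range line.length).map (gfun line) := by
  rw [enum_eq]
  apply List.map_congr_left
  intro j _
  simp [gfun]

-- building the dict from enumerate keeps exactly that association list
lemma ofList_enum (line : List String) :
    (PySem.Dict.ofList (PySem.List.enumerate line)).items = PySem.List.enumerate line := by
  unfold PySem.Dict.ofList PySem.Dict.update
  have := PySem.Dict.items_foldl_insert_fresh (PySem.List.enumerate line)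
    Prod.fst Prod.snd PySem.Dict.empty
    (by intro a _; simp [PySem.Dict.contains_empty])
    (by rw [show (PySem.List.enumerate line).map Prod.fst =
            (PySem.List.enumerate line).map (·.1) from rfl,
          PySem.List.map_fst_enumerate]
        exact PySem.List.nodup_pyRange_one _ _)
  simpa using this

-- filtering away one key changes no other key's membership test
lemma any_filter_ne {L : List (Int × String)} {i j : Int} (h : j ≠ i) :
    (L.filter (fun p => !(p.1 == i))).any (fun p => p.1 == j) =
      L.any (fun p => p.1 == j) := by
  induction L with
  | nil => simp
  | cons a t ih =>
    by_cases ha : a.1 = i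
    · have hbi : (a.1 == i) = true := by simp [ha]
      have hbj : (a.1 == j) = false := by simp [ha, Ne.symm h]
      simp [hbi, hbj, List.any_cons, ih]
    · have hbi : (a.1 == i) = false := by simp [ha]
      simp [hbi, List.any_cons, ih]

-- nor any other key's first match
lemma find?_filter_ne {L : List (Int × String)} {i j : Int} (h : j ≠ i) :
    (L.filter (fun p => !(p.1 == i))).find? (fun p => p.1 == j) =
      L.find? (fun p => p.1 == j) := by
  induction L with
  | nil => simp
  | cons a t ih =>
    by_cases ha : a.1 = i
    · have hbi : (a.1 == i) = true := by simp [ha]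
      have hbj : (a.1 == j) = false := by simp [ha, Ne.symm h]
      simp [hbi, hbj, ih]
    · have hbi : (a.1 == i) = false := by simp [ha]
      by_cases haj : a.1 = j
      · have hbj : (a.1 == j) = true := by simp [haj]
        simp [hbi, hbj]
      · have hbj : (a.1 == j) = false := by simp [haj]
        simp [hbi, hbj, ih]

-- invariant of B's pop loop: it extracts the present keys of idx in order and
-- leaves the association list filtered by idx
lemma popLoop (idx : List Int) (hidx : idx.Nodup) (L : List (Int × String)) (acc : List Int) :
    idx.foldl popIntStep (acc, PySem.Dict.mk L) =
      (acc ++ (idx.filter (fun i => L.any (fun p => p.1 == i))).map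
          (fun i => (PySem.Int.ofStr?
            (((L.find? (fun p => p.1 == i)).map Prod.snd).getD "")).getD 0),
       PySem.Dict.mk (L.filter (fun p => !(decide (p.1 ∈ idx))))) := by
  induction idx generalizing L acc with
  | nil => simp
  | cons i rest ih =>
    have hnr : i ∉ rest := (List.nodup_cons.mp hidx).1
    have hrest : rest.Nodup := (List.nodup_cons.mp hidx).2
    rw [List.foldl_cons]
    rcases hf : L.find? (fun p => p.1 == i) with _ | pr
    · -- key i absent: step is the identity
      have hstep : popIntStep (acc, PySem.Dict.mk L) i = (acc, PySem.Dict.mk L) := by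
        simp [popIntStep, PySem.Dict.pop?, PySem.Dict.get?, hf]
      have hany : L.any (fun p => p.1 == i) = false := by
        rw [List.any_eq_false]
        intro p hp
        exact List.find?_eq_none.mp hf p hp
      rw [hstep, ih hrest]
      have hfl : L.filter (fun p => !(decide (p.1 ∈ rest))) =
          L.filter (fun p => !(decide (p.1 ∈ i :: rest))) := by
        apply List.filter_congr
        intro p hp
        have : ¬ (p.1 = i) := by
          have := List.find?_eq_none.mp hf p hp
          simpa using this
        simp [List.mem_cons, this]
      rw [hfl]
      simp [List.filter, hany]
    · -- key i present: pop it
      have hstep : popIntStep (acc, PySem.Dict.mk L) i =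
          (acc ++ [(PySem.Int.ofStr? pr.2).getD 0],
           PySem.Dict.mk (L.filter (fun p => !(p.1 == i)))) := by
        simp [popIntStep, PySem.Dict.pop?, PySem.Dict.get?, hf, PySem.Dict.erase]
      have hany : L.any (fun p => p.1 == i) = true := by
        rw [List.any_eq_true]
        exact ⟨pr, List.mem_of_find?_eq_some hf, by simpa using List.find?_some hf⟩
      rw [hstep, ih hrest]
      have hfc : (i :: rest).filter (fun j => L.any (fun p => p.1 == j)) =
          i :: rest.filter (fun j => L.any (fun p => p.1 == j)) := by
        simp [hany]
      have hcongr : rest.filter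
            (fun j => (L.filter (fun p => !(p.1 == i))).any (fun p => p.1 == j)) =
          rest.filter (fun j => L.any (fun p => p.1 == j)) := by
        apply List.filter_congr
        intro j hj
        exact any_filter_ne (fun h => hnr (by rw [← h]; exact hj))
      refine Prod.ext_iff.mpr ⟨?_, ?_⟩
      · -- the int lists agree
        rw [List.append_assoc, hfc, List.map_cons, hf]
        simp only [Option.map_some, Option.getD_some, List.singleton_append]
        rw [hcongr]
        refine congrArg (acc ++ ·) (congrArg (List.cons _) ?_)
        apply List.map_congr_left
        intro j hj
        have hjr : j ∈ rest := List.mem_of_mem_filter hj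
        rw [find?_filter_ne (fun h => hnr (by rw [← h]; exact hjr))]
      · -- the leftover dicts agree
        apply PySem.Dict.ext
        show (List.filter (fun p => !(p.1 == i)) L).filter (fun p => !(decide (p.1 ∈ rest))) =
          L.filter (fun p => !(decide (p.1 ∈ i :: rest)))
        rw [List.filter_filter]
        apply List.filter_congr
        intro p _
        by_cases hpi : p.1 = i
        · simp [hpi]
        · simp [List.mem_cons, hpi]

-- key search over the indexed map: first match is the key itself when present
lemma find?_gmap (line : List String) (l : List Nat) (c : Nat) :
    ((l.map (gfun line)).find? (fun p => p.1 == (c : Int))) =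
      if c ∈ l then some (gfun line c) else none := by
  induction l with
  | nil => simp
  | cons a t ih =>
    by_cases hac : a = c
    · subst hac
      simp [gfun]
    · have : ((a : Int) == (c : Int)) = false := by
        simp only [beq_eq_false_iff_ne, ne_eq]
        exact_mod_cast hac
      simp [gfun, this, ih, List.mem_cons, Ne.symm hac]

lemma any_gmap (line : List String) (l : List Nat) (c : Nat) :
    ((l.map (gfun line)).any (fun p => p.1 == (c : Int))) = decide (c ∈ l) := by
  induction l with
  | nil => simp
  | cons a t ih =>
    by_cases hac : a = c
    · subst hac; simp [List.any_cons, gfun]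
    · have : ((a : Int) == (c : Int)) = false := by
        simp only [beq_eq_false_iff_ne, ne_eq]
        exact_mod_cast hac
      simp [List.any_cons, gfun, this, ih, List.mem_cons, Ne.symm hac]

-- the Int column list is the Nat column list, cast
lemma EInt_eq :
    ([0, 2, 4, 10, 11, 12] : List Int) =
      ([0, 2, 4, 10, 11, 12] : List Nat).map (Nat.cast) := by
  simp

lemma castMemE (j : Nat) :
    ((j : Int) ∈ (([0, 2, 4, 10, 11, 12] : List Nat).map (Nat.cast : Nat → Int))) ↔
      j ∈ ([0, 2, 4, 10, 11, 12] : List Nat) :=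
  List.mem_map_of_injective Nat.cast_injective

lemma B_eq_canon (line : List String) : formatHousing_alt line = canonForm line := by
  rcases hn : line.length with _ | k
  · have : line = [] := List.length_eq_zero_iff.mp hn
    subst this; decide
  · have hne : line ≠ [] := by intro h; subst h; simp at hn
    have hget : PySem.List.pyGet? line (-1) = some (line.getD k "") := by
      rw [PySem.List.pyGet?_neg_one, List.getLast?_eq_getElem?, hn]
      simp [List.getD, List.getElem?_eq_getElem (by omega : k < line.length)]
    unfold formatHousing_alt canonForm
    dsimp only
    have hitems : PySem.Dict.ofList (PySem.List.enumerate line) =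
        PySem.Dict.mk ((List.range line.length).map (gfun line)) := by
      apply PySem.Dict.ext
      rw [ofList_enum, enum_eq_gmap]
    rw [hitems, EInt_eq, popLoop _ (by decide) _ _, List.nil_append]
    -- the extracted integer list
    have hints : ((([0, 2, 4, 10, 11, 12] : List Nat).map (Nat.cast : Nat → Int)).filter
          (fun i => ((List.range line.length).map (gfun line)).any (fun p => p.1 == i))).map
          (fun i => (PySem.Int.ofStr? ((Option.map Prod.snd
            (((List.range line.length).map (gfun line)).find? (fun p => p.1 == i))).getD "")).getD 0)
        = (([0, 2, 4, 10, 11, 12] : List Nat).filter (fun c => decide (c < line.length))).map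
          (fun c => (PySem.Int.ofStr? (line.getD c "")).getD 0) := by
      rw [List.filter_map, List.map_map]
      have hflt : ([0, 2, 4, 10, 11, 12] : List Nat).filter
            ((fun i => ((List.range line.length).map (gfun line)).any (fun p => p.1 == i)) ∘
              (Nat.cast : Nat → Int))
          = ([0, 2, 4, 10, 11, 12] : List Nat).filter (fun c => decide (c < line.length)) := by
        apply List.filter_congr
        intro c _
        show ((List.range line.length).map (gfun line)).any (fun p => p.1 == ((c : Nat) : Int))
          = decide (c < line.length)
        rw [any_gmap, decide_eq_decide]
        exact List.mem_range
      rw [hflt]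
      apply List.map_congr_left
      intro c hc
      have hcn : c < line.length := by simpa using (List.mem_filter.mp hc).2
      show (PySem.Int.ofStr? ((Option.map Prod.snd
          (((List.range line.length).map (gfun line)).find? (fun p => p.1 == ((c : Nat) : Int)))).getD "")).getD 0
        = (PySem.Int.ofStr? (line.getD c "")).getD 0
      rw [find?_gmap]
      simp [List.mem_range, hcn, gfun]
    rw [hints]
    -- the leftover association list
    have hM : ((List.range line.length).map (gfun line)).filter
          (fun p => !(decide (p.1 ∈ ([0, 2, 4, 10, 11, 12] : List Nat).map (Nat.cast : Nat → Int))))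
        = ((List.range line.length).filter
            (fun j => !(decide (j ∈ ([0, 2, 4, 10, 11, 12] : List Nat))))).map (gfun line) := by
      rw [List.filter_map]
      refine congrArg _ (List.filter_congr fun j _ => ?_)
      show (!(decide ((gfun line j).1 ∈ ([0, 2, 4, 10, 11, 12] : List Nat).map (Nat.cast : Nat → Int))))
        = !(decide (j ∈ ([0, 2, 4, 10, 11, 12] : List Nat)))
      simp only [gfun]
      rw [decide_eq_decide.mpr (castMemE j)]
    rw [hM]
    have hm : ((line.length : Int) - 1) = ((k : Nat) : Int) := by rw [hn]; push_cast; ring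
    rw [hm]
    have hfind := find?_gmap line
      ((List.range line.length).filter (fun j => !(decide (j ∈ ([0, 2, 4, 10, 11, 12] : List Nat))))) k
    by_cases kE : k ∈ ([0, 2, 4, 10, 11, 12] : List Nat)
    · -- last column is an integer column: the label pop misses
      have hmem : k ∉ (List.range line.length).filter
          (fun j => !(decide (j ∈ ([0, 2, 4, 10, 11, 12] : List Nat)))) := by
        intro hkm
        have := (List.mem_filter.mp hkm).2
        simp [kE] at this
      rw [if_neg hmem] at hfind
      simp only [PySem.Dict.pop?, PySem.Dict.get?, hfind, Option.map_none]
      have hlab : (line ≠ [] ∧ (line.length - 1) ∉ ([0, 2, 4, 10, 11, 12] : List Nat) ∧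
          PySem.List.pyGet? line (-1) = some " <=50K.") = False := by
        apply eq_false
        rintro ⟨-, hnotE, -⟩
        exact hnotE (by rw [hn]; simpa using kE)
      simp only [hlab, if_false]
      refine Prod.ext_iff.mpr ⟨rfl, Prod.ext_iff.mpr ⟨?_, rfl⟩⟩
      -- string list: the i ≠ n-1 conjunct is vacuous since n-1 is an integer column
      show PySem.Dict.values (PySem.Dict.mk _) = _
      simp only [PySem.Dict.values, List.map_map]
      have hfc : (List.range line.length).filter
            (fun j => !(decide (j ∈ ([0, 2, 4, 10, 11, 12] : List Nat))))
          = (List.range line.length).filter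
            (fun i => decide (i ∉ ([0, 2, 4, 10, 11, 12] : List Nat) ∧ i ≠ line.length - 1)) := by
        apply List.filter_congr
        intro j _
        by_cases hj : j ∈ ([0, 2, 4, 10, 11, 12] : List Nat)
        · simp [hj]
        · have : j ≠ line.length - 1 := by
            intro h
            exact hj (by rw [h, hn]; simpa using kE)
          simp [hj, this]
      rw [hfc]
      apply List.map_congr_left
      intro j _
      simp [gfun]
    · -- last column is a data column: the label pop hits
      have hmem : k ∈ (List.range line.length).filter
          (fun j => !(decide (j ∈ ([0, 2, 4, 10, 11, 12] : List Nat)))) := by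
        rw [List.mem_filter]
        exact ⟨List.mem_range.mpr (by omega), by simp [kE]⟩
      rw [if_pos hmem] at hfind
      simp only [PySem.Dict.pop?, PySem.Dict.get?, hfind, Option.map_some]
      have hk' : line.length - 1 = k := by omega
      have hlab : (line ≠ [] ∧ (line.length - 1) ∉ ([0, 2, 4, 10, 11, 12] : List Nat) ∧
          PySem.List.pyGet? line (-1) = some " <=50K.") =
          (line.getD k "" = " <=50K.") := by
        rw [eq_iff_iff]
        constructor
        · rintro ⟨-, -, hp⟩
          rw [hget] at hp
          exact Option.some_injective _ hp
        · intro hs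
          exact ⟨hne, by rw [hk']; exact kE, by rw [hget, hs]⟩
      simp only [hlab]
      refine Prod.ext_iff.mpr ⟨rfl, Prod.ext_iff.mpr ⟨?_, ?_⟩⟩
      · -- string list: drop the label cell from the leftover list
        show PySem.Dict.values (PySem.Dict.mk _) = _
        simp only [PySem.Dict.values]
        rw [List.filter_map, List.filter_filter, List.map_map]
        have hfc : (List.range line.length).filter
              (fun a => ((fun p => !(p.1 == ((k : Nat) : Int))) ∘ gfun line) a &&
                (!(decide (a ∈ ([0, 2, 4, 10, 11, 12] : List Nat)))))
            = (List.range line.length).filter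
              (fun i => decide (i ∉ ([0, 2, 4, 10, 11, 12] : List Nat) ∧ i ≠ line.length - 1)) := by
          apply List.filter_congr
          intro j _
          by_cases hj : j ∈ ([0, 2, 4, 10, 11, 12] : List Nat)
          · simp [hj, gfun]
          · by_cases hjk : j = k
            · simp [hjk, gfun, hk']
            · have : ((j : Int) == ((k : Nat) : Int)) = false := by
                simp only [beq_eq_false_iff_ne, ne_eq]
                exact_mod_cast hjk
              simp [hj, this, gfun, hk', hjk]
        rw [hfc]
        apply List.map_congr_left
        intro j _
        simp [gfun]
      · -- the label itself
        by_cases hs : line.getD k "" = " <=50K." <;> simp [gfun, List.getD]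

-- ===== VERDICT (by name: the statement is the Claim_ definition above) =====
theorem formatHousing_spec : Claim_equal_formatHousing := by
  intro line _ _
  unfold Spec_formatHousing
  rw [A_eq_canon, B_eq_canon]
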